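-- pv_equiv track=rewrite | github.com/aflacake/ilyasbat-lang | helpers/menyimpan.py | parse_key_path
-- ===== SOURCE A (Python) =====
-- def parse_key_path(raw_key):
--     """
--     Pisahkan path seperti 'user.name' atau 'arr[0].field' tanpa regex lookbehind.
--     """
--     parts = []
--     current = ""
--     in_bracket = False
--
--     for ch in raw_key:
--         if ch == '.' and not in_bracket:
--             parts.append(current)
--             current = ""
--         else:
--             current += ch
--             if ch == '[':
--                 in_bracket = True
--             elif ch == ']':
--                 in_bracket = False
--
--     if current:
--         parts.append(current)
--
--     return parts
-- ===== SOURCE B (Python) =====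
-- def _find_split(s):
--     # index of the first top-level dot in s, or None
--     in_bracket = False
--     for j, ch in enumerate(s):
--         if ch == '[':
--             in_bracket = True
--         elif ch == ']':
--             in_bracket = False
--         elif ch == '.' and not in_bracket:
--             return j
--     return None
--
--
-- def parse_key_path(raw_key):
--     """
--     Repeatedly find the next top-level dot and slice the segment off,
--     instead of accumulating characters one by one.
--     """
--     parts = []
--     rest = raw_key
--     while True:
--         j = _find_split(rest)
--         if j is None:
--             if rest:
--                 parts.append(rest)
--             return parts
--         parts.append(rest[:j])
--         rest = rest[j + 1:]
-- ===== Notes on version B (the rewrite author's own statement) =====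
-- stated objective: alternative
-- what changed: B replaces A's single character-accumulating scan (building each segment char by char with in_bracket state) by a repeated find-next-top-level-dot search plus string slicing, recursing on the remainder after each dot.
import Mathlib
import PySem

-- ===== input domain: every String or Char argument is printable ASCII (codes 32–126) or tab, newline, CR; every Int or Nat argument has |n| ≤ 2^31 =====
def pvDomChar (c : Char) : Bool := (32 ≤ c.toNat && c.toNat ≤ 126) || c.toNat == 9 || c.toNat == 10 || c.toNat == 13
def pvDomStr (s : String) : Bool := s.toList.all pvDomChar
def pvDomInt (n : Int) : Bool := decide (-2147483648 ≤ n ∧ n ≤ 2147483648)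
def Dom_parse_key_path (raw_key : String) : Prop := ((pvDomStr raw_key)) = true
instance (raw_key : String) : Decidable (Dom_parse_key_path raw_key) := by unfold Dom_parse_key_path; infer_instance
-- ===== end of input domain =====

-- B finds each top-level dot and slices the segment off, instead of A's char-by-char accumulation; alternative decomposition, same cost.


-- ===== PORT A =====
-- A's loop over the characters: state (parts, current, in_bracket), same branch order.
def pkALoop (cs : List Char) (parts : List (List Char)) (cur : List Char) (inb : Bool) :
    List (List Char) :=
  match cs with
  | [] => if cur = [] then parts else parts ++ [cur]
  | c :: rest =>
    if c = '.' ∧ inb = false then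
      pkALoop rest (parts ++ [cur]) [] inb
    else
      pkALoop rest parts (cur ++ [c])
        (if c = '[' then true else if c = ']' then false else inb)

def parse_key_path (raw_key : String) : List String :=
  (pkALoop raw_key.toList [] [] false).map String.ofList

-- ===== PORT B =====
-- Source B's _find_split: index of the first top-level dot, or none.
def findSplit (cs : List Char) (inb : Bool) : Option Nat :=
  match cs with
  | [] => none
  | c :: rest =>
    if c = '[' then (findSplit rest true).map (· + 1)
    else if c = ']' then (findSplit rest false).map (· + 1)
    else if c = '.' ∧ inb = false then some 0
    else (findSplit rest inb).map (· + 1)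

-- Source B's loop: slice off the segment before the dot, recurse on the rest.
def pkAltCore (cs : List Char) : List (List Char) :=
  match cs with
  | [] => []
  | c :: rest =>
    match findSplit (c :: rest) false with
    | none => [c :: rest]
    | some j => (c :: rest).take j :: pkAltCore ((c :: rest).drop (j + 1))
termination_by cs.length
decreasing_by simp [List.drop_succ_cons]

def parse_key_path_alt (raw_key : String) : List String :=
  (pkAltCore raw_key.toList).map String.ofList

-- ===== PRECONDITION & SPEC =====
def Spec_parse_key_path (raw_key : String) (out : List String) : Prop := out = parse_key_path_alt raw_key
instance (raw_key : String) (out : List String) : Decidable (Spec_parse_key_path raw_key out) := by unfold Spec_parse_key_path; infer_instance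

-- ===== CLAIM (what is proved, stated in full; the proofs are below) =====
def Claim_equal_parse_key_path : Prop := ∀ (raw_key : String), Dom_parse_key_path raw_key → Spec_parse_key_path raw_key (parse_key_path raw_key)

-- ===== LEMMAS AND PROOFS =====

-- A's scan, expressed by its first top-level dot: it either consumes everything
-- into cur, or splits at the first dot findSplit finds and restarts.
theorem pkALoop_findSplit (cs : List Char) :
    ∀ (inb : Bool) (parts : List (List Char)) (cur : List Char),
    pkALoop cs parts cur inb =
      match findSplit cs inb with
      | none => if cur ++ cs = [] then parts else parts ++ [cur ++ cs]
      | some j => pkALoop (cs.drop (j + 1)) (parts ++ [cur ++ cs.take j]) [] false := by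
  induction cs with
  | nil => intro inb parts cur; simp [pkALoop, findSplit]
  | cons c rest ih =>
    intro inb parts cur
    by_cases hdot : c = '.' ∧ inb = false
    · obtain ⟨hc, hb⟩ := hdot
      subst hc hb
      simp [pkALoop, findSplit]
    · rw [pkALoop]
      simp only [if_neg hdot]
      rw [ih]
      have hfs : findSplit (c :: rest) inb =
          (findSplit rest (if c = '[' then true else if c = ']' then false else inb)).map (· + 1) := by
        rw [findSplit]
        by_cases h1 : c = '['
        · simp [h1]
        · by_cases h2 : c = ']'
          · simp [h2]
          · simp [h1, h2, hdot]
      rw [hfs]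
      cases hfr : findSplit rest (if c = '[' then true else if c = ']' then false else inb) with
      | none => simp
      | some j => simp [List.take_succ_cons, List.drop_succ_cons]

theorem pkALoop_eq_pkAltCore (n : ℕ) : ∀ (cs : List Char), cs.length ≤ n →
    ∀ (parts : List (List Char)), pkALoop cs parts [] false = parts ++ pkAltCore cs := by
  induction n with
  | zero =>
    intro cs hlen parts
    have : cs = [] := List.eq_nil_of_length_eq_zero (Nat.le_zero.mp hlen)
    subst this
    simp [pkALoop, pkAltCore.eq_def]
  | succ n ih =>
    intro cs hlen parts
    rw [pkALoop_findSplit]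
    cases cs with
    | nil => simp [findSplit, pkAltCore.eq_def]
    | cons c rest =>
      rw [pkAltCore.eq_def]
      cases hfs : findSplit (c :: rest) false with
      | none => simp [hfs]
      | some j =>
        simp only [hfs]
        have hlen' : ((c :: rest).drop (j + 1)).length ≤ n := by
          simp only [List.drop_succ_cons, List.length_cons, List.length_drop] at *
          omega
        rw [ih ((c :: rest).drop (j + 1)) hlen']
        simp

-- ===== VERDICT (by name: the statement is the Claim_ definition above) =====
theorem parse_key_path_spec : Claim_equal_parse_key_path := by
  intro raw_key _
  unfold Spec_parse_key_path parse_key_path parse_key_path_alt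
  rw [pkALoop_eq_pkAltCore raw_key.toList.length raw_key.toList le_rfl []]
  simp
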